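-- pv_equiv track=rewrite | github.com/JSolis2308/ProyectoPython.Grupo8 | ProyectoPython_Grupo8.py | crear_cuadricula
-- ===== SOURCE A (Python) =====
-- def crear_cuadricula(pos_ocupadas={}):  # *
--     # esta función crea la cuadricula principal de posiciones
--     # virtuales del juego, será reutilizada en la función principal
--     # y por eso recibe un parámetro pos_ocupadas en el que se fijarán
--     # las piezas que ya llegaron a fondo
--     cuadricula = [[(255, 255, 255) for j in range(10)] for i in range(20)]
--
--     for i in range(len(cuadricula)):
--         for j in range(len(cuadricula[i])):
--             if (j, i) in pos_ocupadas:
--                 colortemp = pos_ocupadas[(j, i)]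
--                 cuadricula[i][j] = colortemp
--                 # este for lo que hace es revisar las llaves de
--                 # pos_ocupadas y si hay una posicion ya guardada
--                 # se colorea del color de esa pieza
--     return cuadricula
-- ===== SOURCE B (Python) =====
-- def crear_cuadricula(pos_ocupadas={}):
--     # Build the 20x10 white grid, then write only the occupied cells:
--     # iterate once over the dict items instead of testing membership at
--     # every one of the 200 cells.
--     cuadricula = [[(255, 255, 255) for j in range(10)] for i in range(20)]
--     for (j, i), color in pos_ocupadas.items():
--         if 0 <= i < 20 and 0 <= j < 10:
--             cuadricula[i][j] = color
--     return cuadricula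
-- ===== Notes on version B (the rewrite author's own statement) =====
-- stated objective: idiomatic
-- what changed: B builds the white grid and then iterates once over pos_ocupadas.items(), writing each in-range occupied cell, instead of scanning all 200 cells and testing dict membership at each one.
import Mathlib
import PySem

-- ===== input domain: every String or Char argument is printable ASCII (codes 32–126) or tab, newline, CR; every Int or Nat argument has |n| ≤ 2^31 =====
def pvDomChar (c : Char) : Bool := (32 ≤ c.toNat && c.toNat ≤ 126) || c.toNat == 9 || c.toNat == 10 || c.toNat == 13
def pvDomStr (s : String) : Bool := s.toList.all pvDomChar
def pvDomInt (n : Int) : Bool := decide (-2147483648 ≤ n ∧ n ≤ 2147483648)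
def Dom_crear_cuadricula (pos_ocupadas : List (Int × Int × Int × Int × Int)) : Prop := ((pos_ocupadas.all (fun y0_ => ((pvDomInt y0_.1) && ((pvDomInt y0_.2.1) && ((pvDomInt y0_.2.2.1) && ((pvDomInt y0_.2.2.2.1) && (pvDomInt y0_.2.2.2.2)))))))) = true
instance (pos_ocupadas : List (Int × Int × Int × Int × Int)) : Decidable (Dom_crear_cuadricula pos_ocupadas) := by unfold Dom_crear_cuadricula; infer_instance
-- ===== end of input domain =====

-- B iterates once over the occupied positions instead of scanning all 200 cells with a membership test at each; same return value.


-- ===== PORT A =====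
-- dict lookup: an entry is (j, i, r, g, b) = key (j, i) ↦ value (r, g, b); first match (assoc-list convention)
def pvLookup (pos : List (Int × Int × Int × Int × Int)) (j i : Int) : Option (Int × Int × Int) :=
  (pos.find? (fun e => e.1 == j && e.2.1 == i)).map (fun e => e.2.2)

def crear_cuadricula (pos_ocupadas : List (Int × Int × Int × Int × Int)) : List (List (Int × Int × Int)) :=
  let cuadricula : List (List (Int × Int × Int)) :=
    (PySem.List.pyRange 0 20 1).map (fun _ => (PySem.List.pyRange 0 10 1).map (fun _ => ((255 : Int), (255 : Int), (255 : Int))))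
  List.foldl (fun c i =>
      List.foldl (fun c j =>
          match pvLookup pos_ocupadas j i with
          | some colortemp =>
              -- cuadricula[i][j] = colortemp ; i, j come from range() so the index is in range (no IndexError)
              PySem.List.pySetD c i (PySem.List.pySetD (PySem.List.pyGetD c i []) j colortemp)
          | none => c)
        c (PySem.List.pyRange 0 (Int.ofNat (PySem.List.pyGetD c i []).length) 1))
    cuadricula (PySem.List.pyRange 0 (Int.ofNat cuadricula.length) 1)

-- ===== PORT B =====
def crear_cuadricula_alt (pos_ocupadas : List (Int × Int × Int × Int × Int)) : List (List (Int × Int × Int)) :=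
  let cuadricula : List (List (Int × Int × Int)) :=
    (PySem.List.pyRange 0 20 1).map (fun _ => (PySem.List.pyRange 0 10 1).map (fun _ => ((255 : Int), (255 : Int), (255 : Int))))
  List.foldl (fun c e =>
      if 0 ≤ e.2.1 ∧ e.2.1 < 20 ∧ 0 ≤ e.1 ∧ e.1 < 10 then
        PySem.List.pySetD c e.2.1 (PySem.List.pySetD (PySem.List.pyGetD c e.2.1 []) e.1 e.2.2)
      else c)
    cuadricula pos_ocupadas

-- ===== PRECONDITION & SPEC =====
-- Pre_ excludes association lists with duplicate (j, i) keys: such lists do not represent any Python dict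
-- (a defensible-corner artefact of the encoding, on which the first-match and last-write readings disagree).
def Pre_crear_cuadricula (pos_ocupadas : List (Int × Int × Int × Int × Int)) : Prop :=
  (pos_ocupadas.map (fun e => (e.1, e.2.1))).Nodup
instance (pos_ocupadas : List (Int × Int × Int × Int × Int)) : Decidable (Pre_crear_cuadricula pos_ocupadas) := by unfold Pre_crear_cuadricula; infer_instance

def pvWitness_crear_cuadricula : (List (Int × Int × Int × Int × Int)) := [(0, 0, 1, 2, 3), (3, 1, 9, 9, 9), (11, 2, 5, 5, 5)]

def Spec_crear_cuadricula (pos_ocupadas : List (Int × Int × Int × Int × Int)) (out : List (List (Int × Int × Int))) : Prop := out = crear_cuadricula_alt pos_ocupadas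
instance (pos_ocupadas : List (Int × Int × Int × Int × Int)) (out : List (List (Int × Int × Int))) : Decidable (Spec_crear_cuadricula pos_ocupadas out) := by unfold Spec_crear_cuadricula; infer_instance

-- ===== CLAIM (what is proved, stated in full; the proofs are below) =====
def Claim_equal_crear_cuadricula : Prop := ∀ (pos_ocupadas : List (Int × Int × Int × Int × Int)), Dom_crear_cuadricula pos_ocupadas → Pre_crear_cuadricula pos_ocupadas → Spec_crear_cuadricula pos_ocupadas (crear_cuadricula pos_ocupadas)

-- ===== LEMMAS AND PROOFS =====

def pvWhite : Int × Int × Int := (255, 255, 255)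

def pvGrid0 : List (List (Int × Int × Int)) :=
  (PySem.List.pyRange 0 20 1).map (fun _ => (PySem.List.pyRange 0 10 1).map (fun _ => ((255 : Int), (255 : Int), (255 : Int))))

def pvRStep (pos : List (Int × Int × Int × Int × Int)) (i : Int) (r : List (Int × Int × Int)) (j : Int) : List (Int × Int × Int) :=
  match pvLookup pos j i with
  | some col => PySem.List.pySetD r j col
  | none => r

def pvSpecRow (pos : List (Int × Int × Int × Int × Int)) (i : Nat) : List (Int × Int × Int) :=
  (List.range 10).map (fun (j : Nat) => (pvLookup pos ((j : Nat) : Int) (i : Int)).getD pvWhite)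

def pvCell (g : List (List (Int × Int × Int))) (i j : Nat) : Int × Int × Int :=
  (g.getD i []).getD j pvWhite

lemma pvRStep_some {pos : List (Int × Int × Int × Int × Int)} {i j : Int} {col : Int × Int × Int}
    (h : pvLookup pos j i = some col) (r : List (Int × Int × Int)) :
    pvRStep pos i r j = PySem.List.pySetD r j col := by
  simp [pvRStep, h]

lemma pvRStep_none {pos : List (Int × Int × Int × Int × Int)} {i j : Int}
    (h : pvLookup pos j i = none) (r : List (Int × Int × Int)) :
    pvRStep pos i r j = r := by
  simp [pvRStep, h]

lemma pv_getD_eq_get {α : Type} (l : List α) (d : α) (k : Nat) (h : k < l.length) :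
    l.getD k d = l[k] := by
  rw [List.getD_eq_getElem?_getD, List.getElem?_eq_getElem h]; rfl

lemma pv_getD_set {α : Type} (l : List α) (n k : Nat) (x : α) (d : α) (hn : n < l.length) :
    (l.set n x).getD k d = if k = n then x else l.getD k d := by
  by_cases hk : k = n
  · subst hk
    rw [pv_getD_eq_get _ _ _ (by simpa using hn), List.getElem_set]
    simp
  · by_cases hkl : k < l.length
    · rw [pv_getD_eq_get _ _ _ (by simpa using hkl), pv_getD_eq_get _ _ _ hkl, List.getElem_set]
      simp [Ne.symm hk, hk]
    · rw [List.getD_eq_getElem?_getD, List.getD_eq_getElem?_getD,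
        List.getElem?_eq_none (by simpa using hkl), List.getElem?_eq_none (by omega)]
      simp [hk]

lemma pv_set_getD_self {α : Type} (l : List α) (n : Nat) (d : α) (h : n < l.length) :
    l.set n (l.getD n d) = l := by
  rw [pv_getD_eq_get _ _ _ h, List.set_getElem_self]

lemma pv_getD_replicate {α : Type} (n k : Nat) (a d : α) :
    (List.replicate n a).getD k d = if k < n then a else d := by
  by_cases h : k < n
  · rw [pv_getD_eq_get _ _ _ (by simpa using h), List.getElem_replicate, if_pos h]
  · rw [List.getD_eq_getElem?_getD, List.getElem?_eq_none (by simpa using h), if_neg h]; rfl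

lemma pv_grid0_eq : pvGrid0 = List.replicate 20 (List.replicate 10 pvWhite) := by decide

lemma pv_specRow_len (pos : List (Int × Int × Int × Int × Int)) (i : Nat) :
    (pvSpecRow pos i).length = 10 := by
  simp [pvSpecRow]

lemma pv_specRow_getD (pos : List (Int × Int × Int × Int × Int)) (i j : Nat) (hj : j < 10) :
    (pvSpecRow pos i).getD j pvWhite = (pvLookup pos (j : Int) (i : Int)).getD pvWhite := by
  rw [pv_getD_eq_get _ _ _ (by rw [pv_specRow_len]; omega)]
  simp only [pvSpecRow]
  rw [List.getElem_map, List.getElem_range]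

lemma pv_inner (pos : List (Int × Int × Int × Int × Int)) (i : Int) (hi : 0 ≤ i) :
    ∀ (js : List Int) (c : List (List (Int × Int × Int))), i.toNat < c.length →
    List.foldl (fun c j =>
        match pvLookup pos j i with
        | some colortemp => PySem.List.pySetD c i (PySem.List.pySetD (PySem.List.pyGetD c i []) j colortemp)
        | none => c) c js
      = c.set i.toNat (List.foldl (pvRStep pos i) (c.getD i.toNat []) js) := by
  intro js
  induction js with
  | nil =>
    intro c hlt
    rw [List.foldl_nil, List.foldl_nil, pv_set_getD_self _ _ _ hlt]
  | cons j js ih =>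
    intro c hlt
    simp only [List.foldl_cons]
    have hgd : PySem.List.pyGetD c i [] = c.getD i.toNat [] := by
      rw [PySem.List.pyGetD_eq_getElem c [] hi (by omega), pv_getD_eq_get c [] _ hlt]
    have hhead : (match pvLookup pos j i with
        | some colortemp => PySem.List.pySetD c i (PySem.List.pySetD (PySem.List.pyGetD c i []) j colortemp)
        | none => c)
        = c.set i.toNat (pvRStep pos i (c.getD i.toNat []) j) := by
      rcases h : pvLookup pos j i with _ | col
      · rw [pvRStep_none h, pv_set_getD_self _ _ _ hlt]
      · rw [pvRStep_some h]
        show PySem.List.pySetD c i (PySem.List.pySetD (PySem.List.pyGetD c i []) j col)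
            = c.set i.toNat (PySem.List.pySetD (c.getD i.toNat []) j col)
        rw [hgd, PySem.List.pySetD_of_nonneg c _ hi]
    rw [hhead, ih _ (by rw [List.length_set]; exact hlt),
      pv_getD_set _ _ _ _ _ hlt, if_pos rfl, List.set_set]

lemma pv_row (pos : List (Int × Int × Int × Int × Int)) (i : Int) :
    ∀ (m : Nat) (r : List (Int × Int × Int)), m ≤ r.length →
    (List.foldl (pvRStep pos i) r (PySem.List.pyRange 0 (m : Int) 1)).length = r.length ∧
    ∀ k : Nat, (List.foldl (pvRStep pos i) r (PySem.List.pyRange 0 (m : Int) 1)).getD k pvWhite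
      = if k < m then (pvLookup pos (k : Int) i).getD (r.getD k pvWhite) else r.getD k pvWhite := by
  intro m
  induction m with
  | zero =>
    intro r _
    rw [Nat.cast_zero, PySem.List.pyRange_one_eq_nil (by norm_num)]
    simp
  | succ m ih =>
    intro r hm
    have hcast : ((m + 1 : Nat) : Int) = (m : Int) + 1 := by push_cast; ring
    rw [hcast, PySem.List.pyRange_one_succ_right (by positivity), List.foldl_append]
    obtain ⟨ihlen, ihval⟩ := ih r (by omega)
    simp only [List.foldl_cons, List.foldl_nil]
    rcases h : pvLookup pos (m : Int) i with _ | col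
    · rw [pvRStep_none h]
      refine ⟨ihlen, ?_⟩
      intro k
      rw [ihval k]
      by_cases hk : k = m
      · subst hk; simp [h]
      · by_cases hk2 : k < m
        · rw [if_pos hk2, if_pos (by omega)]
        · rw [if_neg hk2, if_neg (by omega)]
    · rw [pvRStep_some h]
      have hmlen : m < (List.foldl (pvRStep pos i) r (PySem.List.pyRange 0 (m : Int) 1)).length := by
        rw [ihlen]; omega
      rw [PySem.List.pySetD_of_nonneg _ _ (by positivity), Int.toNat_natCast]
      refine ⟨by rw [List.length_set, ihlen], ?_⟩
      intro k
      rw [pv_getD_set _ _ _ _ _ hmlen]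
      by_cases hk : k = m
      · subst hk
        rw [if_pos rfl, if_pos (by omega), h]
        rfl
      · rw [if_neg hk, ihval k]
        by_cases hk2 : k < m
        · rw [if_pos hk2, if_pos (by omega)]
        · rw [if_neg hk2, if_neg (by omega)]

lemma pv_grid0_getD : ∀ k : Nat, k < 20 → pvGrid0.getD k [] = List.replicate 10 pvWhite := by
  decide

lemma pv_outer (pos : List (Int × Int × Int × Int × Int)) :
    ∀ n : Nat, n ≤ 20 →
    (List.foldl (fun c i =>
        List.foldl (fun c j =>
            match pvLookup pos j i with
            | some colortemp => PySem.List.pySetD c i (PySem.List.pySetD (PySem.List.pyGetD c i []) j colortemp)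
            | none => c)
          c (PySem.List.pyRange 0 (Int.ofNat (PySem.List.pyGetD c i []).length) 1))
      pvGrid0 (PySem.List.pyRange 0 (n : Int) 1)).length = 20 ∧
    ∀ k : Nat, k < 20 →
      (List.foldl (fun c i =>
          List.foldl (fun c j =>
              match pvLookup pos j i with
              | some colortemp => PySem.List.pySetD c i (PySem.List.pySetD (PySem.List.pyGetD c i []) j colortemp)
              | none => c)
            c (PySem.List.pyRange 0 (Int.ofNat (PySem.List.pyGetD c i []).length) 1))
        pvGrid0 (PySem.List.pyRange 0 (n : Int) 1)).getD k []
      = if k < n then pvSpecRow pos k else List.replicate 10 pvWhite := by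
  intro n
  induction n with
  | zero =>
    intro _
    refine ⟨?_, ?_⟩
    · rw [Nat.cast_zero, PySem.List.pyRange_one_eq_nil (by norm_num)]
      rw [List.foldl_nil, pv_grid0_eq, List.length_replicate]
    · intro k hk
      rw [Nat.cast_zero, PySem.List.pyRange_one_eq_nil (by norm_num)]
      rw [List.foldl_nil, if_neg (by omega)]
      exact pv_grid0_getD k hk
  | succ n ih =>
    intro hn
    obtain ⟨ihlen, ihval⟩ := ih (by omega)
    have hcast : ((n + 1 : Nat) : Int) = (n : Int) + 1 := by push_cast; ring
    rw [hcast, PySem.List.pyRange_one_succ_right (by positivity), List.foldl_append]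
    simp only [List.foldl_cons, List.foldl_nil]
    set C := List.foldl (fun c i =>
        List.foldl (fun c j =>
            match pvLookup pos j i with
            | some colortemp => PySem.List.pySetD c i (PySem.List.pySetD (PySem.List.pyGetD c i []) j colortemp)
            | none => c)
          c (PySem.List.pyRange 0 (Int.ofNat (PySem.List.pyGetD c i []).length) 1))
      pvGrid0 (PySem.List.pyRange 0 (n : Int) 1) with hC
    have hrow : C.getD n [] = List.replicate 10 pvWhite := by
      rw [ihval n (by omega), if_neg (by omega)]
    have hgd : PySem.List.pyGetD C (n : Int) [] = C.getD n [] := by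
      simp [PySem.List.pyGetD_natCast]
    have hlen10 : (PySem.List.pyGetD C (n : Int) []).length = 10 := by
      rw [hgd, hrow, List.length_replicate]
    have hrange : PySem.List.pyRange 0 (Int.ofNat (PySem.List.pyGetD C (n : Int) []).length) 1
        = PySem.List.pyRange 0 ((10 : Nat) : Int) 1 := by
      rw [hlen10]; norm_num
    have hCb : ((n : Int)).toNat < C.length := by
      rw [ihlen]; omega
    rw [hrange, pv_inner pos (n : Int) (by positivity) _ C hCb]
    simp only [Int.toNat_natCast]
    obtain ⟨rlen, rval⟩ := pv_row pos (n : Int) 10 (C.getD n [])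
      (by rw [hrow, List.length_replicate])
    have hrowres : List.foldl (pvRStep pos (n : Int)) (C.getD n []) (PySem.List.pyRange 0 ((10 : Nat) : Int) 1)
        = pvSpecRow pos n := by
      apply List.ext_getElem
      · rw [rlen, hrow, List.length_replicate, pv_specRow_len]
      · intro j h1 h2
        have hj : j < 10 := by rw [pv_specRow_len] at h2; exact h2
        rw [← pv_getD_eq_get _ pvWhite j h1, ← pv_getD_eq_get _ pvWhite j h2]
        rw [rval j, if_pos hj, hrow, pv_getD_replicate, if_pos hj, pv_specRow_getD pos n j hj]
    rw [hrowres]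
    refine ⟨by rw [List.length_set, ihlen], ?_⟩
    intro k hk
    rw [pv_getD_set _ _ _ _ _ (by omega)]
    by_cases hkn : k = n
    · subst hkn
      rw [if_pos rfl, if_pos (by omega)]
    · rw [if_neg hkn, ihval k hk]
      by_cases hk2 : k < n
      · rw [if_pos hk2, if_pos (by omega)]
      · rw [if_neg hk2, if_neg (by omega)]

lemma pv_lookup_none (pos : List (Int × Int × Int × Int × Int)) (j i : Int)
    (h : (j, i) ∉ pos.map (fun e => (e.1, e.2.1))) : pvLookup pos j i = none := by
  rw [pvLookup, List.find?_eq_none.mpr, Option.map_none]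
  intro x hx
  simp only [Bool.and_eq_true, beq_iff_eq]
  rintro ⟨h1, h2⟩
  exact h (List.mem_map.mpr ⟨x, hx, by rw [h1, h2]⟩)

lemma pv_lookup_cons_of_ne (e : Int × Int × Int × Int × Int) (rest : List (Int × Int × Int × Int × Int))
    (j i : Int) (h : ¬ (e.1 = j ∧ e.2.1 = i)) :
    pvLookup (e :: rest) j i = pvLookup rest j i := by
  have hb : (e.1 == j && e.2.1 == i) = false := by
    simp only [Bool.and_eq_false_iff, beq_eq_false_iff_ne, ne_eq]
    by_cases h1 : e.1 = j
    · exact Or.inr (fun h2 => h ⟨h1, h2⟩)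
    · exact Or.inl h1
  simp [pvLookup, hb]

lemma pv_bfold (pos : List (Int × Int × Int × Int × Int)) :
    ∀ (c : List (List (Int × Int × Int))),
    (pos.map (fun e => (e.1, e.2.1))).Nodup → c.length = 20 →
    (∀ k : Nat, k < 20 → (c.getD k []).length = 10) →
    (List.foldl (fun c e =>
        if 0 ≤ e.2.1 ∧ e.2.1 < 20 ∧ 0 ≤ e.1 ∧ e.1 < 10 then
          PySem.List.pySetD c e.2.1 (PySem.List.pySetD (PySem.List.pyGetD c e.2.1 []) e.1 e.2.2)
        else c) c pos).length = 20 ∧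
    (∀ k : Nat, k < 20 → ((List.foldl (fun c e =>
        if 0 ≤ e.2.1 ∧ e.2.1 < 20 ∧ 0 ≤ e.1 ∧ e.1 < 10 then
          PySem.List.pySetD c e.2.1 (PySem.List.pySetD (PySem.List.pyGetD c e.2.1 []) e.1 e.2.2)
        else c) c pos).getD k []).length = 10) ∧
    ∀ i j : Nat, i < 20 → j < 10 →
      pvCell (List.foldl (fun c e =>
        if 0 ≤ e.2.1 ∧ e.2.1 < 20 ∧ 0 ≤ e.1 ∧ e.1 < 10 then
          PySem.List.pySetD c e.2.1 (PySem.List.pySetD (PySem.List.pyGetD c e.2.1 []) e.1 e.2.2)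
        else c) c pos) i j
      = (pvLookup pos (j : Int) (i : Int)).getD (pvCell c i j) := by
  induction pos with
  | nil =>
    intro c _ hc hrows
    refine ⟨hc, hrows, ?_⟩
    intro i j _ _
    simp [pvLookup]
  | cons e rest ih =>
    intro c hnd hc hrows
    rw [List.map_cons] at hnd
    have hnd' : (rest.map (fun e => (e.1, e.2.1))).Nodup := (List.nodup_cons.mp hnd).2
    have hkey : (e.1, e.2.1) ∉ rest.map (fun e => (e.1, e.2.1)) := (List.nodup_cons.mp hnd).1
    simp only [List.foldl_cons]
    by_cases hg : 0 ≤ e.2.1 ∧ e.2.1 < 20 ∧ 0 ≤ e.1 ∧ e.1 < 10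
    · obtain ⟨h1, h2, h3, h4⟩ := hg
      have hi0lt : e.2.1.toNat < 20 := by omega
      have hj0lt : e.1.toNat < 10 := by omega
      have hstep : (if 0 ≤ e.2.1 ∧ e.2.1 < 20 ∧ 0 ≤ e.1 ∧ e.1 < 10 then
          PySem.List.pySetD c e.2.1 (PySem.List.pySetD (PySem.List.pyGetD c e.2.1 []) e.1 e.2.2)
        else c) = c.set e.2.1.toNat ((c.getD e.2.1.toNat []).set e.1.toNat e.2.2) := by
        rw [if_pos ⟨h1, h2, h3, h4⟩]
        rw [PySem.List.pySetD_of_nonneg _ _ h1, PySem.List.pySetD_of_nonneg _ _ h3]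
        have : PySem.List.pyGetD c e.2.1 [] = c.getD e.2.1.toNat [] := by
          have he : e.2.1 = ((e.2.1.toNat : Nat) : Int) := by omega
          rw [he, PySem.List.pyGetD_natCast, Int.toNat_natCast]
        rw [this]
      rw [hstep]
      have hc1len : (c.set e.2.1.toNat ((c.getD e.2.1.toNat []).set e.1.toNat e.2.2)).length = 20 := by
        rw [List.length_set, hc]
      have hc1rows : ∀ k : Nat, k < 20 →
          ((c.set e.2.1.toNat ((c.getD e.2.1.toNat []).set e.1.toNat e.2.2)).getD k []).length = 10 := by
        intro k hk
        rw [pv_getD_set _ _ _ _ _ (by omega)]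
        by_cases hk0 : k = e.2.1.toNat
        · rw [if_pos hk0, List.length_set]
          exact hrows _ hi0lt
        · rw [if_neg hk0]
          exact hrows k hk
      obtain ⟨rl, rr, rc⟩ := ih _ hnd' hc1len hc1rows
      refine ⟨rl, rr, ?_⟩
      intro i j hi hj
      rw [rc i j hi hj]
      by_cases hkeq : e.1 = (j : Int) ∧ e.2.1 = (i : Int)
      · have hji : e.2.1.toNat = i := by omega
        have hjj : e.1.toNat = j := by omega
        have hlr : pvLookup rest (j : Int) (i : Int) = none := by
          apply pv_lookup_none
          rw [← hkeq.1, ← hkeq.2]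
          exact hkey
        have hlc : pvLookup (e :: rest) (j : Int) (i : Int) = some e.2.2 := by
          simp [pvLookup, hkeq.1, hkeq.2]
        rw [hlr, hlc, Option.getD_none, Option.getD_some]
        rw [pvCell, pv_getD_set _ _ _ _ _ (by omega), if_pos hji.symm, hji,
          pv_getD_set _ _ _ _ _ (by rw [hrows i hi]; omega), if_pos hjj.symm]
      · rw [pv_lookup_cons_of_ne e rest _ _ hkeq]
        have hcell : pvCell (c.set e.2.1.toNat ((c.getD e.2.1.toNat []).set e.1.toNat e.2.2)) i j
            = pvCell c i j := by
          rw [pvCell, pvCell, pv_getD_set _ _ _ _ _ (by omega)]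
          by_cases hii : i = e.2.1.toNat
          · have hjj : j ≠ e.1.toNat := by
              intro hjeq
              exact hkeq ⟨by omega, by omega⟩
            rw [if_pos hii, hii, pv_getD_set _ _ _ _ _ (by rw [hrows _ hi0lt]; omega),
              if_neg (by omega)]
          · rw [if_neg hii]
        rw [hcell]
    · rw [if_neg hg]
      obtain ⟨rl, rr, rc⟩ := ih c hnd' hc hrows
      refine ⟨rl, rr, ?_⟩
      intro i j hi hj
      rw [rc i j hi hj]
      rw [pv_lookup_cons_of_ne e rest _ _ (by
        rintro ⟨ha, hb⟩
        exact hg ⟨by omega, by omega, by omega, by omega⟩)]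

lemma pv_grid_ext (pos : List (Int × Int × Int × Int × Int)) (g : List (List (Int × Int × Int)))
    (h20 : g.length = 20) (hrow : ∀ k : Nat, k < 20 → (g.getD k []).length = 10)
    (hcell : ∀ i j : Nat, i < 20 → j < 10 → pvCell g i j = (pvLookup pos (j : Int) (i : Int)).getD pvWhite) :
    g = (List.range 20).map (fun i => pvSpecRow pos i) := by
  apply List.ext_getElem
  · rw [h20, List.length_map, List.length_range]
  · intro k h1 h2
    have hk : k < 20 := by omega
    have hgk : g.getD k [] = g[k] := pv_getD_eq_get g [] k h1
    rw [List.getElem_map, List.getElem_range]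
    apply List.ext_getElem
    · rw [← hgk, hrow k hk, pv_specRow_len]
    · intro j hj1 hj2
      have hj : j < 10 := by rw [pv_specRow_len] at hj2; exact hj2
      have hcw : g[k][j] = pvCell g k j := by
        rw [pvCell, hgk, pv_getD_eq_get _ pvWhite j hj1]
      rw [hcw, hcell k j hk hj, ← pv_specRow_getD pos k j hj, pv_getD_eq_get _ pvWhite j hj2]

lemma pv_grid0_cell : ∀ i : Nat, i < 20 → ∀ j : Nat, j < 10 → pvCell pvGrid0 i j = pvWhite := by
  decide

lemma pv_a_eq (pos : List (Int × Int × Int × Int × Int)) :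
    crear_cuadricula pos = (List.range 20).map (fun i => pvSpecRow pos i) := by
  have hA : crear_cuadricula pos
      = List.foldl (fun c i =>
          List.foldl (fun c j =>
              match pvLookup pos j i with
              | some colortemp => PySem.List.pySetD c i (PySem.List.pySetD (PySem.List.pyGetD c i []) j colortemp)
              | none => c)
            c (PySem.List.pyRange 0 (Int.ofNat (PySem.List.pyGetD c i []).length) 1))
        pvGrid0 (PySem.List.pyRange 0 ((20 : Nat) : Int) 1) := rfl
  obtain ⟨hlen, hval⟩ := pv_outer pos 20 le_rfl
  rw [hA]
  apply pv_grid_ext pos _ hlen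
  · intro k hk
    rw [hval k hk, if_pos hk, pv_specRow_len]
  · intro i j hi hj
    rw [pvCell, hval i hi, if_pos hi, pv_specRow_getD pos i j hj]

lemma pv_b_eq (pos : List (Int × Int × Int × Int × Int))
    (hnd : (pos.map (fun e => (e.1, e.2.1))).Nodup) :
    crear_cuadricula_alt pos = (List.range 20).map (fun i => pvSpecRow pos i) := by
  have hB : crear_cuadricula_alt pos
      = List.foldl (fun c e =>
          if 0 ≤ e.2.1 ∧ e.2.1 < 20 ∧ 0 ≤ e.1 ∧ e.1 < 10 then
            PySem.List.pySetD c e.2.1 (PySem.List.pySetD (PySem.List.pyGetD c e.2.1 []) e.1 e.2.2)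
          else c) pvGrid0 pos := rfl
  obtain ⟨rl, rr, rc⟩ := pv_bfold pos pvGrid0 hnd (by decide) (by decide)
  rw [hB]
  apply pv_grid_ext pos _ rl rr
  intro i j hi hj
  rw [rc i j hi hj, pv_grid0_cell i hi j hj]

-- ===== VERDICT (by name: the statement is the Claim_ definition above) =====
theorem crear_cuadricula_spec : Claim_equal_crear_cuadricula := by
  intro pos _ hpre
  unfold Spec_crear_cuadricula
  rw [pv_a_eq pos, pv_b_eq pos hpre]
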